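-- pv_equiv track=rewrite | github.com/Timsbim/AoC | 2023/day_14.py | full_cycle_tilt
-- ===== SOURCE A (Python) =====
-- def full_cycle_tilt(rows):
--     height, width = len(rows), len(rows[0])
--
--     for c in range(width):  # North
--         for r0 in range(1, height):
--             if rows[r0][c] != "O":
--                 continue
--             for r in range(r0 - 1, -2, -1):
--                 if r == -1 or rows[r][c] != ".":
--                     break
--             if (r1 := r + 1) != r0:
--                 rows[r1][c], rows[r0][c] = "O", "."
--
--     for row in rows:  # West
--         for c0, char in enumerate(row):
--             if c0 == 0 or char != "O":
--                 continue
--             for c in range(c0 - 1, -2, -1):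
--                 if c == -1 or row[c] != ".":
--                     break
--             if (c1 := c + 1) != c0:
--                 row[c1], row[c0] = "O", "."
--
--     for c in range(width):  # South
--         for r0 in range(height - 2, -1, -1):
--             if rows[r0][c] != "O":
--                 continue
--             for r in range(r0 + 1, height + 1):
--                 if r == height or rows[r][c] != ".":
--                     break
--             if (r1 := r - 1) != r0:
--                 rows[r1][c], rows[r0][c] = "O", "."
--
--     for row in rows:  # East
--         for c0 in range(width - 1, -1, -1):
--             if row[c0] != "O":
--                 continue
--             for c in range(c0 + 1, width + 1):
--                 if c == width or row[c] != ".":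
--                     break
--             if (c1 := c - 1) != c0:
--                 row[c1], row[c0] = "O", "."
--
--     return rows
-- ===== SOURCE B (Python) =====
-- # B: one forward scan per line with a next-free-slot pointer, instead of a
-- # backward scan per rock.  Like A, tilts the grid in place and returns it.
-- def full_cycle_tilt(rows):
--     height, width = len(rows), len(rows[0])
--
--     for c in range(width):  # North
--         free = 0
--         for r in range(height):
--             ch = rows[r][c]
--             if ch == "O":
--                 rows[r][c] = "."
--                 rows[free][c] = "O"
--                 free += 1
--             elif ch != ".":
--                 free = r + 1
--
--     for row in rows:  # West
--         free = 0
--         for c, ch in enumerate(row):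
--             if ch == "O":
--                 row[c] = "."
--                 row[free] = "O"
--                 free += 1
--             elif ch != ".":
--                 free = c + 1
--
--     for c in range(width):  # South
--         free = height - 1
--         for r in range(height - 1, -1, -1):
--             ch = rows[r][c]
--             if ch == "O":
--                 rows[r][c] = "."
--                 rows[free][c] = "O"
--                 free -= 1
--             elif ch != ".":
--                 free = r - 1
--
--     for row in rows:  # East
--         free = width - 1
--         for c in range(width - 1, -1, -1):
--             ch = row[c]
--             if ch == "O":
--                 row[c] = "."
--                 row[free] = "O"
--                 free -= 1
--             elif ch != ".":
--                 free = c - 1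
--
--     return rows
-- ===== Notes on version B (the rewrite author's own statement) =====
-- stated objective: alternative
-- what changed: A slides each rock with its own backward scan over the cells before it; B makes one forward scan per line keeping a next-free-slot pointer, so each of the four tilts touches every cell once; Pre_ excludes only the inputs on which A raises IndexError (empty list, or a row shorter than the first).
import Mathlib
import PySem

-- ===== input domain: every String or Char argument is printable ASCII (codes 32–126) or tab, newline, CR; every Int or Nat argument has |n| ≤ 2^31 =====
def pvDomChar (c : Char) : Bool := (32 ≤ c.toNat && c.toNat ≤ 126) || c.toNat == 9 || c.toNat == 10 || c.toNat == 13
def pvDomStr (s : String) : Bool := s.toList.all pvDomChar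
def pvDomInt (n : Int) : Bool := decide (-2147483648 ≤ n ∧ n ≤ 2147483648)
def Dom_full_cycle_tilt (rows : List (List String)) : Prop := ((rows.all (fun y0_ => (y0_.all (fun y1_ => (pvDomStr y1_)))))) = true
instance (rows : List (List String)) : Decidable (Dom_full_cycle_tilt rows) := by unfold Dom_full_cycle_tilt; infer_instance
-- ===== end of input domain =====

-- B replaces A's per-rock backward scans by one forward scan per line with a
-- next-free-slot pointer.  Both A and B tilt the grid in place (B's Python
-- mutates `rows` like A does); the equivalence proved here is about the
-- return value.

-- ===== PORT A =====
-- Reads rows[r][c] are ported as getD with a default; under Pre_ every index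
-- A dereferences is in range, so the default is never the result.
def cellA (g : List (List String)) (r c : Nat) : String := (g.getD r []).getD c ""

def setCell (g : List (List String)) (r c : Nat) (v : String) : List (List String) :=
  g.modify r (fun row => row.set c v)

-- `for r in range(r0-1, -2, -1): if r == -1 or rows[r][c] != ".": break`; returns r+1
def upStop (g : List (List String)) (c : Nat) : Nat → Nat
  | 0 => 0
  | r + 1 => if cellA g r c == "." then upStop g c r else r + 1

def northStep (g : List (List String)) (c r0 : Nat) : List (List String) :=
  if cellA g r0 c ≠ "O" then g
  else
    let r1 := upStop g c r0
    if r1 ≠ r0 then setCell (setCell g r1 c "O") r0 c "." else g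

def northPass (g : List (List String)) (height c : Nat) : List (List String) :=
  (List.range' 1 (height - 1)).foldl (fun h r0 => northStep h c r0) g

-- `for c in range(c0-1, -2, -1): if c == -1 or row[c] != ".": break`; returns c+1
def leftStop (row : List String) : Nat → Nat
  | 0 => 0
  | c + 1 => if row.getD c "" == "." then leftStop row c else c + 1

def westStep (row : List String) (c0 : Nat) : List String :=
  if c0 = 0 ∨ row.getD c0 "" ≠ "O" then row
  else
    let c1 := leftStop row c0
    if c1 ≠ c0 then (row.set c1 "O").set c0 "." else row

def westRow (row : List String) : List String :=
  (List.range row.length).foldl westStep row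

-- `for r in range(r0+1, height+1): if r == height or rows[r][c] != ".": break`;
-- fuel = height - start makes the `r == height` break structural
def downScan (g : List (List String)) (c : Nat) : Nat → Nat → Nat
  | r, 0 => r
  | r, fuel + 1 => if cellA g r c == "." then downScan g c (r + 1) fuel else r

def southStep (g : List (List String)) (c height r0 : Nat) : List (List String) :=
  if cellA g r0 c ≠ "O" then g
  else
    let r1 := downScan g c (r0 + 1) (height - (r0 + 1)) - 1
    if r1 ≠ r0 then setCell (setCell g r1 c "O") r0 c "." else g

def southPass (g : List (List String)) (height c : Nat) : List (List String) :=
  ((List.range (height - 1)).reverse).foldl (fun h r0 => southStep h c height r0) g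

def rightScan (row : List String) : Nat → Nat → Nat
  | c, 0 => c
  | c, fuel + 1 => if row.getD c "" == "." then rightScan row (c + 1) fuel else c

def eastStep (width : Nat) (row : List String) (c0 : Nat) : List String :=
  if row.getD c0 "" ≠ "O" then row
  else
    let c1 := rightScan row (c0 + 1) (width - (c0 + 1)) - 1
    if c1 ≠ c0 then (row.set c1 "O").set c0 "." else row

def eastRowA (width : Nat) (row : List String) : List String :=
  ((List.range width).reverse).foldl (eastStep width) row

def full_cycle_tilt (rows : List (List String)) : List (List String) :=
  let height := rows.length
  let width := (rows.headD []).length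
  let g1 := (List.range width).foldl (fun g c => northPass g height c) rows
  let g2 := g1.map westRow
  let g3 := (List.range width).foldl (fun g c => southPass g height c) g2
  g3.map (eastRowA width)

-- ===== PORT B =====
-- one scan per line, `free` = index of the next free slot; rocks are moved to
-- `free` on sight, any other non-"." cell resets `free` past itself.
-- Python's `free` can become -1 only after its last dereference (the loops end
-- first), so porting it as a truncating Nat is exact.
def bWestStep (p : List String × Nat) (c : Nat) : List String × Nat :=
  if p.1.getD c "" == "O" then ((p.1.set c ".").set p.2 "O", p.2 + 1)
  else if p.1.getD c "" == "." then p
  else (p.1, c + 1)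

def bWestRow (row : List String) : List String :=
  ((List.range row.length).foldl bWestStep (row, 0)).1

def bEastStep (p : List String × Nat) (c : Nat) : List String × Nat :=
  if p.1.getD c "" == "O" then ((p.1.set c ".").set p.2 "O", p.2 - 1)
  else if p.1.getD c "" == "." then p
  else (p.1, c - 1)

def bEastRow (width : Nat) (row : List String) : List String :=
  (((List.range width).reverse).foldl bEastStep (row, width - 1)).1

def bNorthStep (c : Nat) (p : List (List String) × Nat) (r : Nat) : List (List String) × Nat :=
  if cellA p.1 r c == "O" then (setCell (setCell p.1 r c ".") p.2 c "O", p.2 + 1)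
  else if cellA p.1 r c == "." then p
  else (p.1, r + 1)

def bNorthPass (g : List (List String)) (height c : Nat) : List (List String) :=
  ((List.range height).foldl (bNorthStep c) (g, 0)).1

def bSouthStep (c : Nat) (p : List (List String) × Nat) (r : Nat) : List (List String) × Nat :=
  if cellA p.1 r c == "O" then (setCell (setCell p.1 r c ".") p.2 c "O", p.2 - 1)
  else if cellA p.1 r c == "." then p
  else (p.1, r - 1)

def bSouthPass (g : List (List String)) (height c : Nat) : List (List String) :=
  (((List.range height).reverse).foldl (bSouthStep c) (g, height - 1)).1

def full_cycle_tilt_alt (rows : List (List String)) : List (List String) :=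
  let height := rows.length
  let width := (rows.headD []).length
  let g1 := (List.range width).foldl (fun g c => bNorthPass g height c) rows
  let g2 := g1.map bWestRow
  let g3 := (List.range width).foldl (fun g c => bSouthPass g height c) g2
  g3.map (bEastRow width)

-- ===== PRECONDITION & SPEC =====
-- Pre_ excludes exactly the inputs on which A raises an IndexError: the empty
-- list (len(rows[0])) and grids with a row shorter than the first row.
def Pre_full_cycle_tilt (rows : List (List String)) : Prop :=
  rows ≠ [] ∧ ∀ r ∈ rows, (rows.headD []).length ≤ r.length

instance (rows : List (List String)) : Decidable (Pre_full_cycle_tilt rows) := by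
  unfold Pre_full_cycle_tilt; infer_instance

def pvWitness_full_cycle_tilt : List (List String) := [["O", "."], [".", "#"]]

def Spec_full_cycle_tilt (rows : List (List String)) (out : List (List String)) : Prop :=
  out = full_cycle_tilt_alt rows
instance (rows : List (List String)) (out : List (List String)) : Decidable (Spec_full_cycle_tilt rows out) := by
  unfold Spec_full_cycle_tilt; infer_instance

-- ===== CLAIM (what is proved, stated in full; the proofs are below) =====
def Claim_equal_full_cycle_tilt : Prop :=
  ∀ (rows : List (List String)), Dom_full_cycle_tilt rows → Pre_full_cycle_tilt rows →
    Spec_full_cycle_tilt rows (full_cycle_tilt rows)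

-- ===== LEMMAS AND PROOFS =====

-- the canonical per-line tilt both programs are reduced to: keep "O"s, count
-- pending "."s, flush the dots at each wall
def tiltGo : List String → List String → Nat → List String
  | [], out, dots => out ++ List.replicate dots "."
  | ch :: rest, out, dots =>
    if ch == "O" then tiltGo rest (out ++ ["O"]) dots
    else if ch == "." then tiltGo rest out (dots + 1)
    else tiltGo rest (out ++ List.replicate dots "." ++ [ch]) 0

def tiltLine (line : List String) : List String := tiltGo line [] 0

/-- every row of `g` has at least `w` entries (the grid width is `w`). -/
def Rect (g : List (List String)) (w : Nat) : Prop := ∀ r ∈ g, w ≤ r.length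

/-- Column `c` of a grid, as a list. -/
def col (g : List (List String)) (c : Nat) : List String := g.map (fun row => row.getD c "")

/-- Replace column `c` of `g` by the entries of `s`. -/
def setColG (g : List (List String)) (c : Nat) (s : List String) : List (List String) :=
  List.zipWith (fun row v => row.set c v) g s

/-- Canonical form of one full cycle: per-column/per-row `tiltLine`s. -/
def canon (rows : List (List String)) : List (List String) :=
  let w := (rows.headD []).length
  let g1 := (List.range w).foldl (fun g c => setColG g c (tiltLine (col g c))) rows
  let g2 := g1.map tiltLine
  let g3 := (List.range w).foldl (fun g c => setColG g c ((tiltLine (col g c).reverse).reverse)) g2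
  g3.map (fun row => (tiltLine (row.take w).reverse).reverse ++ row.drop w)

theorem tiltGo_length (rest : List String) : ∀ out dots,
    (tiltGo rest out dots).length = out.length + dots + rest.length := by
  induction rest with
  | nil => intro out dots; simp [tiltGo]
  | cons ch rest ih =>
    intro out dots
    by_cases h1 : ch == "O" <;> by_cases h2 : ch == "." <;>
      simp [tiltGo, h1, h2, ih] <;> omega

theorem tiltLine_length (l : List String) : (tiltLine l).length = l.length := by
  simp [tiltLine, tiltGo_length]

theorem getD_app_left (l1 l2 : List String) (n : Nat) (hn : n < l1.length) (d : String) :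
    (l1 ++ l2).getD n d = l1.getD n d := by
  rw [List.getD_eq_getElem _ _ (by simp; omega), List.getD_eq_getElem _ _ hn,
    List.getElem_append_left hn]

theorem getD_app (l1 l2 : List String) (n : Nat) (d : String) :
    (l1 ++ l2).getD (l1.length + n) d = l2.getD n d := by
  simp [List.getD, List.getElem?_append_right (Nat.le_add_right l1.length n)]

theorem set_app (l1 l2 : List String) (n : Nat) (v : String) :
    (l1 ++ l2).set (l1.length + n) v = l1 ++ l2.set n v := by
  induction l1 with
  | nil => simp
  | cons a l ih =>
    have h : (a :: l).length + n = (l.length + n) + 1 := by simp; omega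
    rw [h]
    simpa using ih

-- ==== line lemma, west ====

theorem leftStop_le (row : List String) : ∀ c0, leftStop row c0 ≤ c0 := by
  intro c0; induction c0 with
  | zero => simp [leftStop]
  | succ c ih => simp only [leftStop]; split <;> omega

theorem leftStop_mid (out : List String) (dots : Nat) (tail : List String)
    (hout : out.getLast? ≠ some ".") :
    ∀ j, j ≤ dots →
      leftStop (out ++ List.replicate dots "." ++ tail) (out.length + j) = out.length := by
  intro j
  induction j with
  | zero =>
    intro _
    rcases List.eq_nil_or_concat out with rfl | ⟨l', b, rfl⟩
    · simp [leftStop]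
    · simp only [List.concat_eq_append, List.length_append, List.length_cons,
        List.length_nil, Nat.zero_add, Nat.add_zero]
      show leftStop _ (l'.length + 1) = l'.length + 1
      have hb : b ≠ "." := by
        intro hb; apply hout; rw [hb] at *; simp [List.getLast?_concat]
      have hd : ((l' ++ [b]) ++ List.replicate dots "." ++ tail).getD l'.length "" = b := by
        have : (l' ++ [b]) ++ List.replicate dots "." ++ tail
            = l' ++ ([b] ++ (List.replicate dots "." ++ tail)) := by simp
        rw [this]
        have := getD_app l' ([b] ++ (List.replicate dots "." ++ tail)) 0 ""
        simpa using this
      simp [leftStop, hd, hb]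
  | succ j ih =>
    intro hj
    have hj' : j ≤ dots := by omega
    have hd : (out ++ List.replicate dots "." ++ tail).getD (out.length + j) "" = "." := by
      rw [List.append_assoc, getD_app out (List.replicate dots "." ++ tail) j ""]
      rw [getD_app_left _ tail j (by simp; omega)]
      exact List.getD_replicate _ (by omega)
    have : out.length + (j + 1) = (out.length + j) + 1 := by omega
    rw [this]
    simp only [leftStop, hd]
    simp only [BEq.rfl, if_true]
    exact ih hj'

theorem rep_shift (d : Nat) (t : List String) :
    List.replicate d "." ++ "." :: t = List.replicate (d + 1) "." ++ t := by
  simp [List.replicate_succ', List.append_assoc]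

theorem rep_comm (d : Nat) (t : List String) :
    List.replicate d "." ++ "." :: t = "." :: (List.replicate d "." ++ t) := by
  rw [rep_shift d t, List.replicate_succ]
  simp

theorem getD_mid (out : List String) (dots : Nat) (ch : String) (t : List String) :
    (out ++ List.replicate dots "." ++ ch :: t).getD (out.length + dots) "" = ch := by
  rw [List.append_assoc, getD_app]
  induction dots with
  | zero => simp
  | succ d ihd => simpa [List.replicate_succ, List.getD_cons_succ] using ihd

theorem west_gen : ∀ (rest out : List String) (dots : Nat),
    out.getLast? ≠ some "." →
    (List.range' (out.length + dots) rest.length).foldl westStep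
        (out ++ List.replicate dots "." ++ rest) = tiltGo rest out dots := by
  intro rest
  induction rest with
  | nil => intro out dots _; simp [tiltGo]
  | cons ch rest' ih =>
    intro out dots hout
    rw [List.length_cons, List.range'_succ, List.foldl_cons]
    have hch := getD_mid out dots ch rest'
    by_cases hO : ch = "O"
    · subst hO
      by_cases hk : out.length + dots = 0
      · have hod : out = [] ∧ dots = 0 := by
          constructor
          · exact List.length_eq_zero_iff.mp (by omega)
          · omega
        obtain ⟨rfl, rfl⟩ := hod
        have hstep : westStep ([] ++ List.replicate 0 "." ++ "O" :: rest') 0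
            = [] ++ List.replicate 0 "." ++ "O" :: rest' := by
          simp [westStep]
        rw [hk, hstep]
        have := ih ["O"] 0 (by simp)
        simpa [tiltGo] using this
      · have hstep : westStep (out ++ List.replicate dots "." ++ "O" :: rest')
            (out.length + dots) =
            if dots = 0 then out ++ List.replicate dots "." ++ "O" :: rest'
            else ((out ++ List.replicate dots "." ++ "O" :: rest').set out.length "O").set
              (out.length + dots) "." := by
          have hls := leftStop_mid out dots ("O" :: rest') hout dots (le_refl _)
          simp only [westStep, hch, hls]
          rw [if_neg (fun hor => hor.elim (fun h => hk h) (fun h => h rfl))]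
          by_cases hd : dots = 0
          · subst hd; simp
          · rw [if_pos (by omega), if_neg hd]
        rw [hstep]
        by_cases hd : dots = 0
        · subst hd
          rw [if_pos rfl]
          have := ih (out ++ ["O"]) 0 (by simp)
          simp only [List.length_append, List.length_cons, List.length_nil] at this ⊢
          simp only [tiltGo, if_pos (by rfl : (("O":String) == "O") = true)]
          simpa [List.append_assoc, Nat.add_zero] using this
        · obtain ⟨d, rfl⟩ : ∃ d, dots = d + 1 := ⟨dots - 1, by omega⟩
          rw [if_neg (by omega)]
          have hset : ((out ++ List.replicate (d + 1) "." ++ "O" :: rest').set out.length "O").set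
              (out.length + (d + 1)) "."
              = (out ++ ["O"]) ++ List.replicate (d + 1) "." ++ rest' := by
            have h1 := set_app out (List.replicate (d + 1) "." ++ "O" :: rest') 0 "O"
            simp only [Nat.add_zero] at h1
            rw [List.append_assoc, h1]
            simp only [List.replicate_succ, List.cons_append, List.set_cons_zero]
            have e3 : out ++ "O" :: (List.replicate d "." ++ "O" :: rest')
                = (out ++ ["O"]) ++ (List.replicate d "." ++ "O" :: rest') := by simp
            have e4 : out.length + (d + 1) = (out ++ ["O"]).length + d := by simp; omega
            rw [e3, e4, set_app]
            have h3 := set_app (List.replicate d ".") ("O" :: rest') 0 "."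
            simp only [List.length_replicate, Nat.add_zero] at h3
            rw [h3]
            rw [List.set_cons_zero, rep_shift d rest']
            simp [List.replicate_succ]
          rw [hset]
          have := ih (out ++ ["O"]) (d + 1) (by simp)
          simp only [List.length_append, List.length_cons, List.length_nil] at this ⊢
          simp only [tiltGo, if_pos (by rfl : (("O":String) == "O") = true)]
          have harith : out.length + (d + 1) + 1 = out.length + 1 + (d + 1) := by omega
          rw [harith]
          exact this
    · have hstep : westStep (out ++ List.replicate dots "." ++ ch :: rest')
          (out.length + dots) = out ++ List.replicate dots "." ++ ch :: rest' := by
        simp [westStep, hch, hO]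
      rw [hstep]
      by_cases hdot : ch = "."
      · subst hdot
        simp only [tiltGo, beq_iff_eq, if_neg hO, eq_self_iff_true, if_true]
        have := ih out (dots + 1) hout
        rw [List.append_assoc, ← rep_shift dots rest', ← List.append_assoc] at this
        have harith : out.length + (dots + 1) = out.length + dots + 1 := by omega
        rw [harith] at this
        exact this
      · simp only [tiltGo, beq_iff_eq, if_neg hO, if_neg hdot]
        have := ih (out ++ List.replicate dots "." ++ [ch]) 0
          (by simp [List.getLast?_concat, hdot])
        simp only [List.length_append, List.length_replicate, List.length_cons,
          List.length_nil, Nat.add_zero] at this ⊢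
        simpa [List.append_assoc] using this

theorem westRow_eq_tiltLine (row : List String) : westRow row = tiltLine row := by
  have := west_gen row [] 0 (by simp)
  simpa [westRow, tiltLine, List.range_eq_range'] using this

-- ==== line lemma, east ====

theorem rightScan_mid (P : List String) (dots : Nat) (Q : List String)
    (hQ : Q.head? ≠ some ".") :
    rightScan (P ++ List.replicate dots "." ++ Q) P.length (dots + Q.length) = P.length + dots := by
  induction dots generalizing P with
  | zero =>
    cases Q with
    | nil => simp [rightScan]
    | cons q Q' =>
      have hq : q ≠ "." := by simpa using hQ
      have hd : (P ++ List.replicate 0 "." ++ (q :: Q')).getD P.length "" = q := by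
        simpa using getD_app P (q :: Q') 0 ""
      simp only [Nat.zero_add, List.length_cons]
      show rightScan _ P.length (Q'.length + 1) = P.length + 0
      simp [rightScan, hd, hq]
  | succ j ih =>
    have hd : (P ++ List.replicate (j + 1) "." ++ Q).getD P.length "" = "." := by
      rw [List.append_assoc]
      have := getD_app P (List.replicate (j + 1) "." ++ Q) 0 ""
      simp only [Nat.add_zero] at this
      rw [this, getD_app_left _ Q 0 (by simp)]
      exact List.getD_replicate _ (by omega)
    have h1 : j + 1 + Q.length = (j + Q.length) + 1 := by omega
    rw [h1]
    simp only [rightScan, hd, BEq.rfl, if_true]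
    have h2 : P ++ List.replicate (j + 1) "." ++ Q
        = (P ++ ["."]) ++ List.replicate j "." ++ Q := by
      simp [List.replicate_succ]
    have h3 : P.length + 1 = (P ++ ["."]).length := by simp
    rw [h2, h3, ih (P ++ ["."])]
    simp; omega

theorem east_gen (w : Nat) : ∀ (rev outR : List String) (dots : Nat),
    outR.getLast? ≠ some "." → w = rev.length + dots + outR.length →
    ((List.range rev.length).reverse).foldl (eastStep w)
        (rev.reverse ++ List.replicate dots "." ++ outR.reverse) = (tiltGo rev outR dots).reverse := by
  intro rev
  induction rev with
  | nil => intro outR dots _ _; simp [tiltGo]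
  | cons ch rev' ih =>
    intro outR dots hout hw
    have hrng : (List.range (ch :: rev').length).reverse
        = rev'.length :: (List.range rev'.length).reverse := by
      simp [List.range_succ]
    rw [hrng, List.foldl_cons]
    have hL : (ch :: rev').reverse ++ List.replicate dots "." ++ outR.reverse
        = rev'.reverse ++ [ch] ++ (List.replicate dots "." ++ outR.reverse) := by simp
    have hch : ((ch :: rev').reverse ++ List.replicate dots "." ++ outR.reverse).getD
        rev'.length "" = ch := by
      rw [hL, List.append_assoc]
      have := getD_app rev'.reverse ([ch] ++ (List.replicate dots "." ++ outR.reverse)) 0 ""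
      simpa using this
    by_cases hO : ch = "O"
    · subst hO
      have hscan : rightScan ((("O" : String) :: rev').reverse ++ List.replicate dots "." ++ outR.reverse)
          (rev'.length + 1) (w - (rev'.length + 1)) = rev'.length + 1 + dots := by
        have harw : w - (rev'.length + 1) = dots + outR.reverse.length := by
          simp only [List.length_reverse]; simp at hw; omega
        have hP : ("O" :: rev').reverse ++ List.replicate dots "." ++ outR.reverse
            = (rev'.reverse ++ ["O"]) ++ List.replicate dots "." ++ outR.reverse := by simp
        have hlen : rev'.length + 1 = (rev'.reverse ++ ["O"]).length := by simp
        rw [harw, hP, hlen]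
        have := rightScan_mid (rev'.reverse ++ ["O"]) dots outR.reverse
          (by rw [List.head?_reverse]; exact hout)
        simpa using this
      have hstep : eastStep w ((("O" : String) :: rev').reverse ++ List.replicate dots "." ++ outR.reverse)
          rev'.length =
          if dots = 0 then ("O" :: rev').reverse ++ List.replicate dots "." ++ outR.reverse
          else (((("O" : String) :: rev').reverse ++ List.replicate dots "." ++ outR.reverse).set
            (rev'.length + dots) "O").set rev'.length "." := by
        simp only [eastStep, hch, hscan]
        rw [if_neg (fun hno => hno rfl)]
        by_cases hd : dots = 0
        · subst hd; simp
        · rw [if_pos (by omega), if_neg (by omega)]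
          have : rev'.length + 1 + dots - 1 = rev'.length + dots := by omega
          rw [this]
      rw [hstep]
      by_cases hd : dots = 0
      · subst hd
        rw [if_pos rfl]
        have := ih (outR ++ ["O"]) 0 (by simp) (by simp at hw ⊢; omega)
        simp only [tiltGo, beq_iff_eq, eq_self_iff_true, if_true]
        simpa using this
      · obtain ⟨d, rfl⟩ : ∃ d, dots = d + 1 := ⟨dots - 1, by omega⟩
        rw [if_neg (by omega)]
        have hset : (((("O" : String) :: rev').reverse ++ List.replicate (d + 1) "." ++ outR.reverse).set
            (rev'.length + (d + 1)) "O").set rev'.length "."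
            = rev'.reverse ++ List.replicate (d + 1) "." ++ (outR ++ ["O"]).reverse := by
          have e1 : ("O" :: rev').reverse ++ List.replicate (d + 1) "." ++ outR.reverse
              = (rev'.reverse ++ ["O"]) ++ (List.replicate (d + 1) "." ++ outR.reverse) := by simp
          have e2 : rev'.length + (d + 1) = (rev'.reverse ++ ["O"]).length + d := by simp; omega
          rw [e1, e2, set_app]
          have e3 : (List.replicate (d + 1) "." ++ outR.reverse).set d "O"
              = List.replicate d "." ++ "O" :: outR.reverse := by
            rw [List.replicate_succ', List.append_assoc]
            have h3 := set_app (List.replicate d ".") (["."] ++ outR.reverse) 0 "O"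
            simp only [List.length_replicate, Nat.add_zero] at h3
            rw [h3]
            simp
          rw [e3]
          have e4 : (rev'.reverse ++ ["O"]) ++ (List.replicate d "." ++ "O" :: outR.reverse)
              = rev'.reverse ++ ("O" :: (List.replicate d "." ++ "O" :: outR.reverse)) := by simp
          have e5 : rev'.length = rev'.reverse.length + 0 := by simp
          rw [e4, e5, set_app]
          simp [List.replicate_succ]
        rw [hset]
        have := ih (outR ++ ["O"]) (d + 1) (by simp) (by simp at hw ⊢; omega)
        simp only [tiltGo, beq_iff_eq, eq_self_iff_true, if_true]
        simpa using this
    · have hstep : eastStep w ((ch :: rev').reverse ++ List.replicate dots "." ++ outR.reverse)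
          rev'.length = (ch :: rev').reverse ++ List.replicate dots "." ++ outR.reverse := by
        simp [eastStep, hch, hO]
      rw [hstep]
      by_cases hdot : ch = "."
      · subst hdot
        simp only [tiltGo, beq_iff_eq, if_neg hO, eq_self_iff_true, if_true]
        have := ih outR (dots + 1) hout (by simp at hw ⊢; omega)
        have e1 : rev'.reverse ++ List.replicate (dots + 1) "." ++ outR.reverse
            = ("." :: rev').reverse ++ List.replicate dots "." ++ outR.reverse := by
          simp [List.replicate_succ', List.append_assoc, rep_comm]
        rw [e1] at this
        exact this
      · simp only [tiltGo, beq_iff_eq, if_neg hO, if_neg hdot]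
        have := ih (outR ++ List.replicate dots "." ++ [ch]) 0
          (by simp [List.getLast?_concat, hdot]) (by simp at hw ⊢; omega)
        have e1 : rev'.reverse ++ List.replicate 0 "." ++ (outR ++ List.replicate dots "." ++ [ch]).reverse
            = (ch :: rev').reverse ++ List.replicate dots "." ++ outR.reverse := by
          simp [List.append_assoc, List.reverse_append]
        rw [e1] at this
        exact this

theorem eastRowA_eq (row : List String) :
    eastRowA row.length row = (tiltLine row.reverse).reverse := by
  have := east_gen row.length row.reverse [] 0 (by simp) (by simp)
  simpa [eastRowA, tiltLine] using this

-- ==== grid/column machinery ====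

theorem col_length (g : List (List String)) (c : Nat) : (col g c).length = g.length := by
  simp [col]

theorem setColG_length (g : List (List String)) (c : Nat) (s : List String)
    (hs : s.length = g.length) : (setColG g c s).length = g.length := by
  simp [setColG, hs]

theorem getElem_setColG (g : List (List String)) (c : Nat) (s : List String)
    (hs : s.length = g.length) (r : Nat) (hr : r < (setColG g c s).length) :
    (setColG g c s)[r] = (g[r]'(by simp_all [setColG])).set c (s[r]'(by simp_all [setColG])) := by
  simp [setColG, List.getElem_zipWith]

theorem setColG_rect (g : List (List String)) (c : Nat) (s : List String) (w : Nat)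
    (hg : Rect g w) (hs : s.length = g.length) : Rect (setColG g c s) w := by
  intro row hrow
  obtain ⟨r, hr, rfl⟩ := List.getElem_of_mem hrow
  rw [getElem_setColG g c s hs r hr]
  simpa using hg _ (List.getElem_mem _)

theorem cell_setColG (g : List (List String)) (c : Nat) (s : List String)
    (hs : s.length = g.length) (r : Nat) (hr : r < g.length) (w : Nat) (hg : Rect g w)
    (hc : c < w) : cellA (setColG g c s) r c = s.getD r "" := by
  have hlen : (setColG g c s).length = g.length := setColG_length g c s hs
  have hr' : r < (setColG g c s).length := by omega
  have hs' : r < s.length := by omega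
  unfold cellA
  rw [List.getD_eq_getElem _ _ hr', getElem_setColG g c s hs r hr']
  have hcw : c < ((g[r]'hr).set c (s[r]'hs')).length := by
    have := hg _ (List.getElem_mem hr); simp; omega
  rw [List.getD_eq_getElem _ _ hcw, List.getD_eq_getElem _ _ hs']
  simp [List.getElem_set]

theorem setCell_setColG (g : List (List String)) (c : Nat) (s : List String)
    (hs : s.length = g.length) (r : Nat) (hr : r < g.length) (v : String) :
    setCell (setColG g c s) r c v = setColG g c (s.set r v) := by
  apply List.ext_getElem
  · simp [setCell, setColG, hs]
  · intro i h1 h2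
    have hi : i < g.length := by simpa [setCell, setColG, hs] using h1
    have hi1 : i < (setColG g c s).length := by rw [setColG_length g c s hs]; exact hi
    have hsi : i < s.length := by omega
    simp only [setCell]
    rw [List.getElem_modify, getElem_setColG g c s hs i hi1,
      getElem_setColG g c (s.set r v) (by simp [hs]) i h2]
    by_cases hir : r = i
    · subst hir
      simp [List.set_set, List.getElem_set]
    · simp [List.getElem_set, hir]

theorem setColG_self (g : List (List String)) (c : Nat) (w : Nat) (hg : Rect g w)
    (hc : c < w) : setColG g c (col g c) = g := by
  apply List.ext_getElem
  · simp [setColG, col]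
  · intro i h1 h2
    have hcl : (col g c).length = g.length := col_length g c
    rw [getElem_setColG g c (col g c) hcl i h1]
    have hcw : c < (g[i]'h2).length := by have := hg _ (List.getElem_mem h2); omega
    have : (col g c)[i]'(by omega) = (g[i]'h2).getD c "" := by simp [col]
    rw [this, List.getD_eq_getElem _ _ hcw]
    exact List.set_getElem_self hcw

-- ==== A's north pass = set column to westRow of column ====

theorem westStep_length (s : List String) (c0 : Nat) : (westStep s c0).length = s.length := by
  unfold westStep
  split
  · rfl
  · dsimp only
    split <;> simp

theorem upStop_setColG (g : List (List String)) (c : Nat) (s : List String) (w : Nat)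
    (hs : s.length = g.length) (hg : Rect g w) (hc : c < w) :
    ∀ r0, r0 ≤ g.length → upStop (setColG g c s) c r0 = leftStop s r0 := by
  intro r0
  induction r0 with
  | zero => intro _; simp [upStop, leftStop]
  | succ r ihr =>
    intro hr
    have hcell := cell_setColG g c s hs r (by omega) w hg hc
    simp only [upStop, leftStop, hcell]
    split
    · exact ihr (by omega)
    · rfl

theorem north_bridge (g : List (List String)) (c : Nat) (s : List String) (w : Nat)
    (hs : s.length = g.length) (hg : Rect g w) (hc : c < w) (r0 : Nat)
    (h1 : 1 ≤ r0) (h2 : r0 < g.length) :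
    northStep (setColG g c s) c r0 = setColG g c (westStep s r0) := by
  have hcell := cell_setColG g c s hs r0 h2 w hg hc
  have hup := upStop_setColG g c s w hs hg hc r0 (by omega)
  simp only [northStep, westStep, hcell, hup]
  by_cases hO : s.getD r0 "" = "O"
  · rw [if_neg (fun k => k hO),
      if_neg (fun k => Or.elim k (fun h0 => absurd h0 (by omega)) (fun hne => hne hO))]
    have hr1 : leftStop s r0 ≤ r0 := leftStop_le s r0
    by_cases hne : leftStop s r0 = r0
    · rw [if_neg (fun k => k hne), if_neg (fun k => k hne)]
    · rw [if_pos hne, if_pos hne,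
        setCell_setColG g c s hs (leftStop s r0) (by omega) "O",
        setCell_setColG g c (s.set (leftStop s r0) "O") (by simpa using hs) r0 h2 "."]
  · rw [if_pos hO, if_pos (Or.inr hO)]

theorem fold_bridge_north (g : List (List String)) (c : Nat) (w : Nat) (hg : Rect g w)
    (hc : c < w) : ∀ (idxs : List Nat), (∀ i ∈ idxs, 1 ≤ i ∧ i < g.length) →
    ∀ s : List String, s.length = g.length →
    idxs.foldl (fun h r0 => northStep h c r0) (setColG g c s)
      = setColG g c (idxs.foldl westStep s) := by
  intro idxs
  induction idxs with
  | nil => intro _ s _; rfl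
  | cons i idxs ihn =>
    intro hb s hs
    rw [List.foldl_cons, List.foldl_cons,
      north_bridge g c s w hs hg hc i (hb i (by simp)).1 (hb i (by simp)).2]
    exact ihn (fun j hj => hb j (by simp [hj])) (westStep s i) (by rw [westStep_length]; exact hs)

theorem westRow_eq_fold (s : List String) (h : Nat) (hlen : s.length = h) (hh : 0 < h) :
    (List.range' 1 (h - 1)).foldl westStep s = westRow s := by
  unfold westRow
  rw [hlen, List.range_eq_range']
  obtain ⟨m, rfl⟩ : ∃ m, h = m + 1 := ⟨h - 1, by omega⟩
  rw [List.range'_succ, List.foldl_cons]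
  have : westStep s 0 = s := by simp [westStep]
  rw [this]
  simp

theorem np_eq (g : List (List String)) (h w c : Nat) (hh : h = g.length) (hg : Rect g w)
    (hc : c < w) (hpos : 0 < h) : northPass g h c = setColG g c (tiltLine (col g c)) := by
  unfold northPass
  conv_lhs => rw [← setColG_self g c w hg hc]
  rw [fold_bridge_north g c w hg hc (List.range' 1 (h - 1))
      (fun i hi => by rw [List.mem_range'] at hi; omega) (col g c) (col_length g c),
    westRow_eq_fold (col g c) h (by rw [col_length]; omega) hpos,
    westRow_eq_tiltLine]

theorem eastStep_length (wd : Nat) (s : List String) (c0 : Nat) :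
    (eastStep wd s c0).length = s.length := by
  unfold eastStep
  split
  · rfl
  · dsimp only
    split <;> simp

theorem rightScan_ge (s : List String) : ∀ fuel r, r ≤ rightScan s r fuel := by
  intro fuel
  induction fuel with
  | zero => intro r; simp [rightScan]
  | succ f ihf =>
    intro r
    simp only [rightScan]
    split
    · exact le_trans (by omega) (ihf (r + 1))
    · omega

theorem rightScan_le (s : List String) : ∀ fuel r, rightScan s r fuel ≤ r + fuel := by
  intro fuel
  induction fuel with
  | zero => intro r; simp [rightScan]
  | succ f ihf =>
    intro r
    simp only [rightScan]
    split
    · exact le_trans (ihf (r + 1)) (by omega)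
    · omega

theorem downScan_setColG (g : List (List String)) (c : Nat) (s : List String) (w : Nat)
    (hs : s.length = g.length) (hg : Rect g w) (hc : c < w) :
    ∀ fuel r, r + fuel ≤ g.length → downScan (setColG g c s) c r fuel = rightScan s r fuel := by
  intro fuel
  induction fuel with
  | zero => intro r _; simp [downScan, rightScan]
  | succ f ihf =>
    intro r hr
    have hcell := cell_setColG g c s hs r (by omega) w hg hc
    simp only [downScan, rightScan, hcell]
    split
    · exact ihf (r + 1) (by omega)
    · rfl

theorem south_bridge (g : List (List String)) (c : Nat) (s : List String) (w h : Nat)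
    (hs : s.length = g.length) (hg : Rect g w) (hc : c < w) (hh : h = g.length) (r0 : Nat)
    (h2 : r0 < g.length) :
    southStep (setColG g c s) c h r0 = setColG g c (eastStep h s r0) := by
  have hcell := cell_setColG g c s hs r0 h2 w hg hc
  have hdn := downScan_setColG g c s w hs hg hc (h - (r0 + 1)) (r0 + 1) (by omega)
  simp only [southStep, hcell, hdn]
  by_cases hO : s.getD r0 "" = "O"
  · rw [if_neg (fun k => k hO)]
    have hge := rightScan_ge s (h - (r0 + 1)) (r0 + 1)
    have hle := rightScan_le s (h - (r0 + 1)) (r0 + 1)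
    by_cases hne : rightScan s (r0 + 1) (h - (r0 + 1)) - 1 = r0
    · rw [if_neg (fun k => k hne)]
      simp only [eastStep]
      rw [if_neg (fun k => k hO), if_neg (fun k => k hne)]
    · rw [if_pos hne,
        setCell_setColG g c s hs (rightScan s (r0 + 1) (h - (r0 + 1)) - 1) (by omega) "O",
        setCell_setColG g c (s.set _ "O") (by simpa using hs) r0 h2 "."]
      simp only [eastStep]
      rw [if_neg (fun k => k hO), if_pos hne]
  · rw [if_pos hO]
    simp only [eastStep]
    rw [if_pos hO]

theorem fold_bridge_south (g : List (List String)) (c : Nat) (w h : Nat) (hg : Rect g w)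
    (hc : c < w) (hh : h = g.length) : ∀ (idxs : List Nat), (∀ i ∈ idxs, i < g.length) →
    ∀ s : List String, s.length = g.length →
    idxs.foldl (fun g' r0 => southStep g' c h r0) (setColG g c s)
      = setColG g c (idxs.foldl (eastStep h) s) := by
  intro idxs
  induction idxs with
  | nil => intro _ s _; rfl
  | cons i idxs ihn =>
    intro hb s hs
    rw [List.foldl_cons, List.foldl_cons,
      south_bridge g c s w h hs hg hc hh i (hb i (by simp))]
    exact ihn (fun j hj => hb j (by simp [hj])) (eastStep h s i) (by rw [eastStep_length]; exact hs)

theorem eastRowA_eq_fold (s : List String) (h : Nat) (hlen : s.length = h) (hh : 0 < h) :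
    ((List.range (h - 1)).reverse).foldl (eastStep h) s = eastRowA h s := by
  unfold eastRowA
  obtain ⟨m, rfl⟩ : ∃ m, h = m + 1 := ⟨h - 1, by omega⟩
  rw [show (List.range (m + 1)).reverse = m :: (List.range m).reverse by simp [List.range_succ],
    List.foldl_cons]
  have hstep : eastStep (m + 1) s m = s := by
    unfold eastStep
    split
    · rfl
    · dsimp only
      rw [if_neg (by simp [rightScan])]
  rw [hstep]
  simp

theorem sp_eq (g : List (List String)) (h w c : Nat) (hh : h = g.length) (hg : Rect g w)
    (hc : c < w) (hpos : 0 < h) :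
    southPass g h c = setColG g c ((tiltLine (col g c).reverse).reverse) := by
  unfold southPass
  conv_lhs => rw [← setColG_self g c w hg hc]
  rw [fold_bridge_south g c w h hg hc hh ((List.range (h - 1)).reverse)
      (fun i hi => by simp at hi; omega) (col g c) (col_length g c),
    eastRowA_eq_fold (col g c) h (by rw [col_length]; omega) hpos]
  rw [show h = (col g c).length by rw [col_length]; omega, eastRowA_eq]

theorem col_setColG_ne (g : List (List String)) (c : Nat) (s : List String)
    (hs : s.length = g.length) (c' : Nat) (hne : c' ≠ c) :
    col (setColG g c s) c' = col g c' := by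
  apply List.ext_getElem
  · simp [col, setColG, hs]
  · intro i h1 h2
    have hi : i < g.length := by simpa [col] using h2
    have hi1 : i < (setColG g c s).length := by rw [setColG_length g c s hs]; exact hi
    simp only [col, List.getElem_map]
    rw [getElem_setColG g c s hs i hi1]
    simp only [List.getD_eq_getElem?_getD, List.getElem?_set_ne (fun hcc => hne hcc.symm)]

theorem col_setColG_eq (g : List (List String)) (c : Nat) (s : List String) (w : Nat)
    (hs : s.length = g.length) (hg : Rect g w) (hc : c < w) :
    col (setColG g c s) c = s := by
  apply List.ext_getElem
  · simp [col, setColG, hs]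
  · intro i h1 h2
    have hi : i < g.length := by omega
    have hi1 : i < (setColG g c s).length := by rw [setColG_length g c s hs]; exact hi
    simp only [col, List.getElem_map]
    rw [getElem_setColG g c s hs i hi1]
    have hcw : c < ((g[i]'hi).set c (s[i]'h2)).length := by
      have := hg _ (List.getElem_mem hi); simp; omega
    rw [List.getD_eq_getElem _ _ hcw]
    simp [List.getElem_set]

theorem setColG_rowlen (g : List (List String)) (c : Nat) (s : List String)
    (hs : s.length = g.length) :
    ∀ i, ((setColG g c s).getD i []).length = (g.getD i []).length := by
  intro i
  by_cases hi : i < g.length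
  · have hi' : i < (setColG g c s).length := by rw [setColG_length g c s hs]; exact hi
    rw [List.getD_eq_getElem _ _ hi', List.getD_eq_getElem _ _ hi,
      getElem_setColG g c s hs i hi']
    simp
  · rw [List.getD_eq_default _ _ (by rw [setColG_length g c s hs]; omega),
      List.getD_eq_default _ _ (by omega)]

theorem fold_setcol_inv (f : List String → List String) (hf : ∀ s, (f s).length = s.length)
    (g : List (List String)) (w : Nat) (hg : Rect g w) : ∀ k, k ≤ w →
    ((List.range k).foldl (fun g' c => setColG g' c (f (col g' c))) g).length = g.length ∧
    Rect ((List.range k).foldl (fun g' c => setColG g' c (f (col g' c))) g) w ∧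
    (∀ c, k ≤ c → col ((List.range k).foldl (fun g' c => setColG g' c (f (col g' c))) g) c = col g c) ∧
    (∀ c, c < k → col ((List.range k).foldl (fun g' c => setColG g' c (f (col g' c))) g) c = f (col g c)) ∧
    (∀ i, (((List.range k).foldl (fun g' c => setColG g' c (f (col g' c))) g).getD i []).length = (g.getD i []).length) := by
  intro k
  induction k with
  | zero => intro _; exact ⟨rfl, hg, fun c _ => rfl, fun c hc => by omega, fun i => rfl⟩
  | succ k ihk =>
    intro hk
    obtain ⟨hlen, hrect, hge, hlt, hrow⟩ := ihk (by omega)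
    set R := (List.range k).foldl (fun g' c => setColG g' c (f (col g' c))) g with hR
    have hstep : (List.range (k + 1)).foldl (fun g' c => setColG g' c (f (col g' c))) g
        = setColG R k (f (col R k)) := by
      rw [List.range_succ, List.foldl_append]
      simp [hR]
    have hslen : (f (col R k)).length = R.length := by rw [hf, col_length]
    refine ⟨?_, ?_, ?_, ?_, ?_⟩
    · rw [hstep, setColG_length R k _ hslen]; exact hlen
    · rw [hstep]; exact setColG_rect R k _ w hrect hslen
    · intro c hc
      rw [hstep, col_setColG_ne R k _ hslen c (by omega)]
      exact hge c (by omega)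
    · intro c hc
      rw [hstep]
      by_cases hck : c = k
      · subst hck
        rw [col_setColG_eq R c _ w hslen hrect (by omega), hge c (le_refl _)]
      · rw [col_setColG_ne R k _ hslen c hck]
        exact hlt c (by omega)
    · intro i
      rw [hstep, setColG_rowlen R k _ hslen i]
      exact hrow i

theorem revtilt_length (sx : List String) : ((tiltLine sx.reverse).reverse).length = sx.length := by
  simp [tiltLine_length]

theorem fold_north_phase (h w : Nat) : ∀ (cs : List Nat) (g : List (List String)),
    (∀ c ∈ cs, c < w) → Rect g w → g.length = h → 0 < h →
    cs.foldl (fun g' c => northPass g' h c) g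
      = cs.foldl (fun g' c => setColG g' c (tiltLine (col g' c))) g := by
  intro cs
  induction cs with
  | nil => intros; rfl
  | cons c cs ihc =>
    intro g hb hg hlen hpos
    rw [List.foldl_cons, List.foldl_cons, np_eq g h w c hlen.symm hg (hb c (by simp)) hpos]
    exact ihc _ (fun j hj => hb j (by simp [hj]))
      (setColG_rect g c _ w hg (by rw [tiltLine_length, col_length]))
      (by rw [setColG_length g c _ (by rw [tiltLine_length, col_length])]; exact hlen) hpos

theorem fold_south_phase (h w : Nat) : ∀ (cs : List Nat) (g : List (List String)),
    (∀ c ∈ cs, c < w) → Rect g w → g.length = h → 0 < h →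
    cs.foldl (fun g' c => southPass g' h c) g
      = cs.foldl (fun g' c => setColG g' c ((tiltLine (col g' c).reverse).reverse)) g := by
  intro cs
  induction cs with
  | nil => intros; rfl
  | cons c cs ihc =>
    intro g hb hg hlen hpos
    rw [List.foldl_cons, List.foldl_cons, sp_eq g h w c hlen.symm hg (hb c (by simp)) hpos]
    exact ihc _ (fun j hj => hb j (by simp [hj]))
      (setColG_rect g c _ w hg (by rw [revtilt_length, col_length]))
      (by rw [setColG_length g c _ (by rw [revtilt_length, col_length])]; exact hlen) hpos

-- ==== A's east pass acts only on the first w cells; the tail rides along ====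

theorem rightScan_append (P tail : List String) :
    ∀ fuel r, r + fuel ≤ P.length → rightScan (P ++ tail) r fuel = rightScan P r fuel := by
  intro fuel
  induction fuel with
  | zero => intro r _; simp [rightScan]
  | succ f ihf =>
    intro r hr
    have hget : (P ++ tail).getD r "" = P.getD r "" := getD_app_left P tail r (by omega) ""
    simp only [rightScan, hget]
    split
    · exact ihf (r + 1) (by omega)
    · rfl

theorem eastStep_append (w : Nat) (P tail : List String) (hP : P.length = w) (c0 : Nat)
    (hc0 : c0 < w) : eastStep w (P ++ tail) c0 = eastStep w P c0 ++ tail := by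
  have hget : (P ++ tail).getD c0 "" = P.getD c0 "" := getD_app_left P tail c0 (by omega) ""
  simp only [eastStep, hget, rightScan_append P tail (w - (c0 + 1)) (c0 + 1) (by omega)]
  by_cases hO : P.getD c0 "" = "O"
  · rw [if_neg (fun k => k hO),
      if_neg (show ¬(P.getD c0 "" ≠ "O") from fun k => k hO)]
    have hle := rightScan_le P (w - (c0 + 1)) (c0 + 1)
    by_cases hne : rightScan P (c0 + 1) (w - (c0 + 1)) - 1 = c0
    · rw [if_neg (fun k => k hne), if_neg (fun k => k hne)]
    · have e1 : (P ++ tail).set (rightScan P (c0 + 1) (w - (c0 + 1)) - 1) "O"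
          = P.set (rightScan P (c0 + 1) (w - (c0 + 1)) - 1) "O" ++ tail :=
        List.set_append_left _ _ (by omega)
      have e2 : (P.set (rightScan P (c0 + 1) (w - (c0 + 1)) - 1) "O" ++ tail).set c0 "."
          = (P.set (rightScan P (c0 + 1) (w - (c0 + 1)) - 1) "O").set c0 "." ++ tail :=
        List.set_append_left _ _ (by simp; omega)
      rw [if_pos hne, e1, e2, if_pos hne]
  · rw [if_pos hO, if_pos (show P.getD c0 "" ≠ "O" from hO)]

theorem east_fold_append (w : Nat) (tail : List String) :
    ∀ (idxs : List Nat), (∀ i ∈ idxs, i < w) → ∀ P : List String, P.length = w →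
    idxs.foldl (eastStep w) (P ++ tail) = (idxs.foldl (eastStep w) P) ++ tail := by
  intro idxs
  induction idxs with
  | nil => intro _ P _; rfl
  | cons i idxs ihn =>
    intro hb P hP
    rw [List.foldl_cons, List.foldl_cons, eastStep_append w P tail hP i (hb i (by simp))]
    exact ihn (fun j hj => hb j (by simp [hj])) _ (by rw [eastStep_length]; exact hP)

theorem eastRowA_take (w : Nat) (row : List String) (hwle : w ≤ row.length) :
    eastRowA w row = (tiltLine (row.take w).reverse).reverse ++ row.drop w := by
  have htl : (row.take w).length = w := by simp [hwle]
  unfold eastRowA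
  conv_lhs => rw [← List.take_append_drop w row]
  rw [east_fold_append w (row.drop w) ((List.range w).reverse)
      (fun i hi => by simpa using List.mem_range.mp (List.mem_reverse.mp hi)) _ htl]
  congr 1
  have := eastRowA_eq (row.take w)
  rw [htl] at this
  exact this

-- ==== B's west line: forward free-pointer scan computes tiltLine ====

theorem bwest_gen : ∀ (rest out : List String) (dots : Nat),
    ((List.range' (out.length + dots) rest.length).foldl bWestStep
        (out ++ List.replicate dots "." ++ rest, out.length)).1 = tiltGo rest out dots := by
  intro rest
  induction rest with
  | nil => intro out dots; simp [tiltGo]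
  | cons ch rest' ih =>
    intro out dots
    rw [List.length_cons, List.range'_succ, List.foldl_cons]
    have hch : (out ++ List.replicate dots "." ++ ch :: rest').getD (out.length + dots) "" = ch :=
      getD_mid out dots ch rest'
    by_cases hO : ch = "O"
    · subst hO
      have hstep : bWestStep (out ++ List.replicate dots "." ++ "O" :: rest', out.length)
          (out.length + dots)
          = (((out ++ List.replicate dots "." ++ "O" :: rest').set (out.length + dots) ".").set
              out.length "O", out.length + 1) := by
        simp only [bWestStep]
        rw [hch]
        rfl
      have hset : ((out ++ List.replicate dots "." ++ "O" :: rest').set (out.length + dots) ".").set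
          out.length "O" = (out ++ ["O"]) ++ List.replicate dots "." ++ rest' := by
        have e1 : out ++ List.replicate dots "." ++ "O" :: rest'
            = (out ++ List.replicate dots ".") ++ "O" :: rest' := by simp
        have e2 : out.length + dots = (out ++ List.replicate dots ".").length + 0 := by simp
        rw [e1, e2, set_app, List.set_cons_zero]
        have e3 : (out ++ List.replicate dots ".") ++ "." :: rest'
            = out ++ ("." :: (List.replicate dots "." ++ rest')) := by
          rw [List.append_assoc, ← rep_comm]
        have e4 : out.length = out.length + 0 := rfl
        rw [e3, e4, set_app, List.set_cons_zero]
        simp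
      rw [hstep, hset]
      have := ih (out ++ ["O"]) dots
      simp only [List.length_append, List.length_cons, List.length_nil] at this
      simp only [tiltGo, BEq.rfl, if_true]
      have harith : out.length + dots + 1 = out.length + 1 + dots := by omega
      rw [harith]
      exact this
    · by_cases hdot : ch = "."
      · subst hdot
        have hstep : bWestStep (out ++ List.replicate dots "." ++ "." :: rest', out.length)
            (out.length + dots)
            = (out ++ List.replicate dots "." ++ "." :: rest', out.length) := by
          simp only [bWestStep]
          rw [hch]
          rfl
        rw [hstep]
        simp only [tiltGo, beq_iff_eq, if_neg hO, BEq.rfl, if_true]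
        have := ih out (dots + 1)
        rw [List.append_assoc, ← rep_shift dots rest', ← List.append_assoc] at this
        have harith : out.length + (dots + 1) = out.length + dots + 1 := by omega
        rw [harith] at this
        exact this
      · have hstep : bWestStep (out ++ List.replicate dots "." ++ ch :: rest', out.length)
            (out.length + dots)
            = (out ++ List.replicate dots "." ++ ch :: rest', out.length + dots + 1) := by
          simp only [bWestStep]
          rw [if_neg (by simp only [hch]; simpa using hO), if_neg (by simp only [hch]; simpa using hdot)]
        rw [hstep]
        simp only [tiltGo, beq_iff_eq, if_neg hO, if_neg hdot]
        have := ih (out ++ List.replicate dots "." ++ [ch]) 0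
        simp only [List.length_append, List.length_replicate, List.length_cons,
          List.length_nil, Nat.add_zero] at this
        have e1 : (out ++ List.replicate dots "." ++ [ch]) ++ List.replicate 0 "." ++ rest'
            = out ++ List.replicate dots "." ++ ch :: rest' := by simp
        rw [e1] at this
        have harith : out.length + dots + 1 = out.length + dots + 1 + 0 := by omega
        rw [harith]
        exact this

theorem bWestRow_eq_tiltLine (row : List String) : bWestRow row = tiltLine row := by
  have := bwest_gen row [] 0
  simpa [bWestRow, tiltLine, List.range_eq_range'] using this

-- ==== B's east line: backward free-pointer scan computes the reversed tilt ====

theorem beast_gen : ∀ (rev outR : List String) (dots : Nat),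
    (((List.range rev.length).reverse).foldl bEastStep
        (rev.reverse ++ List.replicate dots "." ++ outR.reverse, rev.length + dots - 1)).1
      = (tiltGo rev outR dots).reverse := by
  intro rev
  induction rev with
  | nil => intro outR dots; simp [tiltGo]
  | cons ch rev' ih =>
    intro outR dots
    rw [show (List.range (ch :: rev').length).reverse
        = rev'.length :: (List.range rev'.length).reverse by simp [List.range_succ],
      List.foldl_cons]
    have hch : ((ch :: rev').reverse ++ List.replicate dots "." ++ outR.reverse).getD
        rev'.length "" = ch := by
      rw [show (ch :: rev').reverse ++ List.replicate dots "." ++ outR.reverse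
          = rev'.reverse ++ ([ch] ++ (List.replicate dots "." ++ outR.reverse)) by simp,
        show rev'.length = rev'.reverse.length + 0 by simp]
      simpa using getD_app rev'.reverse ([ch] ++ (List.replicate dots "." ++ outR.reverse)) 0 ""
    have hfree : (ch :: rev').length + dots - 1 = rev'.length + dots := by
      rw [List.length_cons]
      omega
    by_cases hO : ch = "O"
    · subst hO
      have hstep : bEastStep ((("O" : String) :: rev').reverse ++ List.replicate dots "."
            ++ outR.reverse, ("O" :: rev').length + dots - 1) rev'.length
          = ((((("O" : String) :: rev').reverse ++ List.replicate dots "." ++ outR.reverse).set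
              rev'.length ".").set (("O" :: rev').length + dots - 1) "O",
             ("O" :: rev').length + dots - 1 - 1) := by
        simp only [bEastStep]
        rw [hch]
        rfl
      have hset : (((("O" : String) :: rev').reverse ++ List.replicate dots "." ++ outR.reverse).set
          rev'.length ".").set (rev'.length + dots) "O"
          = rev'.reverse ++ List.replicate dots "." ++ (outR ++ ["O"]).reverse := by
        have e1 : ("O" :: rev').reverse ++ List.replicate dots "." ++ outR.reverse
            = rev'.reverse ++ ("O" :: (List.replicate dots "." ++ outR.reverse)) := by simp
        rw [e1, show rev'.length = rev'.reverse.length + 0 from by simp, set_app,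
          List.set_cons_zero]
        have e2 : rev'.reverse ++ "." :: (List.replicate dots "." ++ outR.reverse)
            = (rev'.reverse ++ List.replicate dots ".") ++ "." :: outR.reverse := by
          rw [← rep_comm]
          simp
        have e3 : rev'.reverse.length + 0 + dots
            = (rev'.reverse ++ List.replicate dots ".").length + 0 := by simp
        rw [e2, e3, set_app, List.set_cons_zero]
        simp
      rw [hstep]
      simp only [hfree]
      rw [hset]
      have := ih (outR ++ ["O"]) dots
      simp only [tiltGo, BEq.rfl, if_true]
      exact this
    · by_cases hdot : ch = "."
      · subst hdot
        have hstep : bEastStep ((("." : String) :: rev').reverse ++ List.replicate dots "."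
              ++ outR.reverse, ("." :: rev').length + dots - 1) rev'.length
            = ((("." : String) :: rev').reverse ++ List.replicate dots "." ++ outR.reverse,
               ("." :: rev').length + dots - 1) := by
          simp only [bEastStep]
          rw [hch]
          rfl
        rw [hstep]
        have erow : ("." :: rev').reverse ++ List.replicate dots "." ++ outR.reverse
            = rev'.reverse ++ List.replicate (dots + 1) "." ++ outR.reverse := by
          simp [List.replicate_succ, List.append_assoc]
        have efree : ("." :: rev').length + dots - 1 = rev'.length + (dots + 1) - 1 := by
          rw [List.length_cons]
          omega
        rw [erow, efree]
        simp only [tiltGo, beq_iff_eq, if_neg hO, BEq.rfl, if_true]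
        exact ih outR (dots + 1)
      · have hstep : bEastStep ((ch :: rev').reverse ++ List.replicate dots "." ++ outR.reverse,
              (ch :: rev').length + dots - 1) rev'.length
            = ((ch :: rev').reverse ++ List.replicate dots "." ++ outR.reverse,
               rev'.length - 1) := by
          simp only [bEastStep]
          rw [if_neg (by simp only [hch]; simpa using hO), if_neg (by simp only [hch]; simpa using hdot)]
        rw [hstep]
        have erow : (ch :: rev').reverse ++ List.replicate dots "." ++ outR.reverse
            = rev'.reverse ++ List.replicate 0 "."
              ++ (outR ++ List.replicate dots "." ++ [ch]).reverse := by
          simp [List.reverse_append, List.append_assoc]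
        have efree : rev'.length - 1 = rev'.length + 0 - 1 := by omega
        rw [erow, efree]
        simp only [tiltGo, beq_iff_eq, if_neg hO, if_neg hdot]
        exact ih (outR ++ List.replicate dots "." ++ [ch]) 0

theorem bEastLine_eq (s : List String) :
    (((List.range s.length).reverse).foldl bEastStep (s, s.length - 1)).1
      = (tiltLine s.reverse).reverse := by
  have := beast_gen s.reverse [] 0
  simpa [tiltLine] using this

-- ==== B's east scan acts only on the first w cells; the tail rides along ====

theorem beast_fold_append (w : Nat) (tail : List String) :
    ∀ (idxs : List Nat), (∀ i ∈ idxs, i < w) → ∀ (P : List String) (free : Nat),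
      P.length = w → free < w →
      idxs.foldl bEastStep (P ++ tail, free)
        = ((idxs.foldl bEastStep (P, free)).1 ++ tail, (idxs.foldl bEastStep (P, free)).2)
      ∧ (idxs.foldl bEastStep (P, free)).1.length = w
      ∧ (idxs.foldl bEastStep (P, free)).2 < w := by
  intro idxs
  induction idxs with
  | nil => intro _ P free hP hf; exact ⟨rfl, hP, hf⟩
  | cons i idxs ihn =>
    intro hb P free hP hf
    have hi : i < w := hb i (by simp)
    have hget : (P ++ tail).getD i "" = P.getD i "" := getD_app_left P tail i (by omega) ""
    rw [List.foldl_cons, List.foldl_cons]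
    by_cases hO : P.getD i "" = "O"
    · have hstep : bEastStep (P ++ tail, free) i
          = (((P ++ tail).set i ".").set free "O", free - 1) := by
        simp only [bEastStep]
        rw [hget, hO]
        rfl
      have hstep2 : bEastStep (P, free) i = ((P.set i ".").set free "O", free - 1) := by
        simp only [bEastStep]
        rw [hO]
        rfl
      rw [hstep, hstep2, List.set_append_left _ _ (by omega),
        List.set_append_left _ _ (by simp; omega)]
      exact ihn (fun j hj => hb j (by simp [hj])) _ _ (by simp [hP]) (by omega)
    · by_cases hdot : P.getD i "" = "."
      · have hstep : bEastStep (P ++ tail, free) i = (P ++ tail, free) := by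
          simp only [bEastStep]
          rw [hget, hdot]
          rfl
        have hstep2 : bEastStep (P, free) i = (P, free) := by
          simp only [bEastStep]
          rw [hdot]
          rfl
        rw [hstep, hstep2]
        exact ihn (fun j hj => hb j (by simp [hj])) _ _ hP hf
      · have hstep : bEastStep (P ++ tail, free) i = (P ++ tail, i - 1) := by
          simp only [bEastStep]
          rw [if_neg (by simp only [hget]; simpa using hO), if_neg (by simp only [hget]; simpa using hdot)]
        have hstep2 : bEastStep (P, free) i = (P, i - 1) := by
          simp only [bEastStep]
          rw [if_neg (by simpa using hO), if_neg (by simpa using hdot)]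
        rw [hstep, hstep2]
        exact ihn (fun j hj => hb j (by simp [hj])) _ _ hP (by omega)

theorem bEastRow_take (w : Nat) (row : List String) (hwle : w ≤ row.length) :
    bEastRow w row = (tiltLine (row.take w).reverse).reverse ++ row.drop w := by
  by_cases hw : w = 0
  · subst hw
    simp [bEastRow, tiltLine, tiltGo]
  · have htl : (row.take w).length = w := by simp [hwle]
    unfold bEastRow
    conv_lhs => rw [← List.take_append_drop w row]
    have happ := beast_fold_append w (row.drop w) ((List.range w).reverse)
      (fun i hi => by simpa using List.mem_range.mp (List.mem_reverse.mp hi))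
      (row.take w) (w - 1) htl (by omega)
    rw [happ.1]
    have := bEastLine_eq (row.take w)
    rw [htl] at this
    rw [this]

-- ==== B's north pass = set column to the free-pointer scan of the column ====

theorem bnorth_fold (g : List (List String)) (c w : Nat) (hg : Rect g w) (hc : c < w) :
    ∀ (k r : Nat), r + k ≤ g.length → ∀ (s : List String) (free : Nat),
      s.length = g.length → free ≤ r →
      (List.range' r k).foldl (bNorthStep c) (setColG g c s, free)
        = (setColG g c (((List.range' r k).foldl bWestStep (s, free)).1),
           ((List.range' r k).foldl bWestStep (s, free)).2) := by
  intro k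
  induction k with
  | zero => intro r _ s free _ _; rfl
  | succ k ihk =>
    intro r hrk s free hs hfree
    rw [List.range'_succ, List.foldl_cons, List.foldl_cons]
    have hr : r < g.length := by omega
    have hcell : cellA (setColG g c s) r c = s.getD r "" := cell_setColG g c s hs r hr w hg hc
    by_cases hO : s.getD r "" = "O"
    · have hstep : bNorthStep c (setColG g c s, free) r
          = (setCell (setCell (setColG g c s) r c ".") free c "O", free + 1) := by
        simp only [bNorthStep]
        rw [hcell, hO]
        rfl
      have hstep2 : bWestStep (s, free) r = ((s.set r ".").set free "O", free + 1) := by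
        simp only [bWestStep]
        rw [hO]
        rfl
      rw [hstep, hstep2, setCell_setColG g c s hs r hr ".",
        setCell_setColG g c (s.set r ".") (by simpa using hs) free (by omega) "O"]
      exact ihk (r + 1) (by omega) _ _ (by simp [hs]) (by omega)
    · by_cases hdot : s.getD r "" = "."
      · have hstep : bNorthStep c (setColG g c s, free) r = (setColG g c s, free) := by
          simp only [bNorthStep]
          rw [hcell, hdot]
          rfl
        have hstep2 : bWestStep (s, free) r = (s, free) := by
          simp only [bWestStep]
          rw [hdot]
          rfl
        rw [hstep, hstep2]
        exact ihk (r + 1) (by omega) _ _ hs (by omega)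
      · have hstep : bNorthStep c (setColG g c s, free) r = (setColG g c s, r + 1) := by
          simp only [bNorthStep]
          rw [if_neg (by simp only [hcell]; simpa using hO), if_neg (by simp only [hcell]; simpa using hdot)]
        have hstep2 : bWestStep (s, free) r = (s, r + 1) := by
          simp only [bWestStep]
          rw [if_neg (by simpa using hO), if_neg (by simpa using hdot)]
        rw [hstep, hstep2]
        exact ihk (r + 1) (by omega) _ _ hs (by omega)

theorem bnp_eq (g : List (List String)) (h w c : Nat) (hh : h = g.length) (hg : Rect g w)
    (hc : c < w) : bNorthPass g h c = setColG g c (tiltLine (col g c)) := by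
  unfold bNorthPass
  conv_lhs => rw [← setColG_self g c w hg hc]
  rw [List.range_eq_range',
    bnorth_fold g c w hg hc h 0 (by omega) (col g c) 0 (col_length g c) (le_refl 0)]
  have := bWestRow_eq_tiltLine (col g c)
  unfold bWestRow at this
  rw [col_length, ← hh, List.range_eq_range'] at this
  dsimp only
  rw [this]

-- ==== B's south pass = set column to the reversed scan of the column ====

theorem bsouth_fold (g : List (List String)) (c w : Nat) (hg : Rect g w) (hc : c < w) :
    ∀ (k : Nat), k ≤ g.length → ∀ (s : List String) (free : Nat),
      s.length = g.length → free < g.length → k ≤ free + 1 →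
      ((List.range k).reverse).foldl (bSouthStep c) (setColG g c s, free)
        = (setColG g c ((((List.range k).reverse).foldl bEastStep (s, free)).1),
           (((List.range k).reverse).foldl bEastStep (s, free)).2) := by
  intro k
  induction k with
  | zero => intro _ s free _ _ _; rfl
  | succ k ihk =>
    intro hk s free hs hfree hkf
    rw [show (List.range (k + 1)).reverse = k :: (List.range k).reverse by simp [List.range_succ],
      List.foldl_cons, List.foldl_cons]
    have hr : k < g.length := by omega
    have hcell : cellA (setColG g c s) k c = s.getD k "" := cell_setColG g c s hs k hr w hg hc
    by_cases hO : s.getD k "" = "O"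
    · have hstep : bSouthStep c (setColG g c s, free) k
          = (setCell (setCell (setColG g c s) k c ".") free c "O", free - 1) := by
        simp only [bSouthStep]
        rw [hcell, hO]
        rfl
      have hstep2 : bEastStep (s, free) k = ((s.set k ".").set free "O", free - 1) := by
        simp only [bEastStep]
        rw [hO]
        rfl
      rw [hstep, hstep2, setCell_setColG g c s hs k hr ".",
        setCell_setColG g c (s.set k ".") (by simpa using hs) free (by omega) "O"]
      exact ihk (by omega) _ _ (by simp [hs]) (by omega) (by omega)
    · by_cases hdot : s.getD k "" = "."
      · have hstep : bSouthStep c (setColG g c s, free) k = (setColG g c s, free) := by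
          simp only [bSouthStep]
          rw [hcell, hdot]
          rfl
        have hstep2 : bEastStep (s, free) k = (s, free) := by
          simp only [bEastStep]
          rw [hdot]
          rfl
        rw [hstep, hstep2]
        exact ihk (by omega) _ _ hs (by omega) (by omega)
      · have hstep : bSouthStep c (setColG g c s, free) k = (setColG g c s, k - 1) := by
          simp only [bSouthStep]
          rw [if_neg (by simp only [hcell]; simpa using hO), if_neg (by simp only [hcell]; simpa using hdot)]
        have hstep2 : bEastStep (s, free) k = (s, k - 1) := by
          simp only [bEastStep]
          rw [if_neg (by simpa using hO), if_neg (by simpa using hdot)]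
        rw [hstep, hstep2]
        exact ihk (by omega) _ _ hs (by omega) (by omega)

theorem bsp_eq (g : List (List String)) (h w c : Nat) (hh : h = g.length) (hg : Rect g w)
    (hc : c < w) (hpos : 0 < h) :
    bSouthPass g h c = setColG g c ((tiltLine (col g c).reverse).reverse) := by
  unfold bSouthPass
  conv_lhs => rw [← setColG_self g c w hg hc]
  rw [bsouth_fold g c w hg hc h (by omega) (col g c) (h - 1) (col_length g c)
    (by omega) (by omega)]
  have := bEastLine_eq (col g c)
  rw [col_length, ← hh] at this
  dsimp only
  rw [this]

-- ==== B's column folds ====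

theorem b_fold_north_phase (h w : Nat) : ∀ (cs : List Nat) (g : List (List String)),
    (∀ c ∈ cs, c < w) → Rect g w → g.length = h →
    cs.foldl (fun g' c => bNorthPass g' h c) g
      = cs.foldl (fun g' c => setColG g' c (tiltLine (col g' c))) g := by
  intro cs
  induction cs with
  | nil => intros; rfl
  | cons c cs ihc =>
    intro g hb hg hlen
    rw [List.foldl_cons, List.foldl_cons, bnp_eq g h w c hlen.symm hg (hb c (by simp))]
    exact ihc _ (fun j hj => hb j (by simp [hj]))
      (setColG_rect g c _ w hg (by rw [tiltLine_length, col_length]))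
      (by rw [setColG_length g c _ (by rw [tiltLine_length, col_length])]; exact hlen)

theorem b_fold_south_phase (h w : Nat) : ∀ (cs : List Nat) (g : List (List String)),
    (∀ c ∈ cs, c < w) → Rect g w → g.length = h → 0 < h →
    cs.foldl (fun g' c => bSouthPass g' h c) g
      = cs.foldl (fun g' c => setColG g' c ((tiltLine (col g' c).reverse).reverse)) g := by
  intro cs
  induction cs with
  | nil => intros; rfl
  | cons c cs ihc =>
    intro g hb hg hlen hpos
    rw [List.foldl_cons, List.foldl_cons, bsp_eq g h w c hlen.symm hg (hb c (by simp)) hpos]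
    exact ihc _ (fun j hj => hb j (by simp [hj]))
      (setColG_rect g c _ w hg (by rw [revtilt_length, col_length]))
      (by rw [setColG_length g c _ (by rw [revtilt_length, col_length])]; exact hlen) hpos

-- ==== shape bookkeeping and the two reductions to `canon` ====

theorem rect_map_tilt (g : List (List String)) (w : Nat) (hg : Rect g w) :
    Rect (g.map tiltLine) w := by
  intro row hrow
  obtain ⟨r0, hr0, rfl⟩ := List.mem_map.mp hrow
  rw [tiltLine_length]
  exact hg r0 hr0

theorem A_canon (rows : List (List String)) (hne : rows ≠ [])
    (hrect0 : ∀ r ∈ rows, (rows.headD []).length ≤ r.length) :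
    full_cycle_tilt rows = canon rows := by
  simp only [full_cycle_tilt, canon]
  have hpos : 0 < rows.length := List.length_pos_of_ne_nil hne
  have hg : Rect rows (rows.headD []).length := fun r hr => hrect0 r hr
  rw [fold_north_phase rows.length (rows.headD []).length (List.range (rows.headD []).length)
      rows (fun c hc => by simpa using hc) hg rfl hpos]
  obtain ⟨hlen1, hg1, _, _, _⟩ := fold_setcol_inv tiltLine tiltLine_length rows
    (rows.headD []).length hg (rows.headD []).length (le_refl _)
  rw [List.map_congr_left (fun r _ => westRow_eq_tiltLine r)]
  have hg2 := rect_map_tilt _ _ hg1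
  have hlen2 : (((List.range (rows.headD []).length).foldl
      (fun g' c => setColG g' c (tiltLine (col g' c))) rows).map tiltLine).length
      = rows.length := by rw [List.length_map]; exact hlen1
  rw [fold_south_phase rows.length (rows.headD []).length (List.range (rows.headD []).length)
      _ (fun c hc => by simpa using hc) hg2 hlen2 hpos]
  obtain ⟨_, hg3, _, _, _⟩ := fold_setcol_inv (fun s => (tiltLine s.reverse).reverse)
    revtilt_length _ (rows.headD []).length hg2 (rows.headD []).length (le_refl _)
  exact List.map_congr_left (fun row hrow => eastRowA_take _ row (hg3 row hrow))

theorem B_canon (rows : List (List String)) (hne : rows ≠ [])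
    (hrect0 : ∀ r ∈ rows, (rows.headD []).length ≤ r.length) :
    full_cycle_tilt_alt rows = canon rows := by
  simp only [full_cycle_tilt_alt, canon]
  have hpos : 0 < rows.length := List.length_pos_of_ne_nil hne
  have hg : Rect rows (rows.headD []).length := fun r hr => hrect0 r hr
  rw [b_fold_north_phase rows.length (rows.headD []).length (List.range (rows.headD []).length)
      rows (fun c hc => by simpa using hc) hg rfl]
  obtain ⟨hlen1, hg1, _, _, _⟩ := fold_setcol_inv tiltLine tiltLine_length rows
    (rows.headD []).length hg (rows.headD []).length (le_refl _)
  rw [List.map_congr_left (fun r _ => bWestRow_eq_tiltLine r)]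
  have hg2 := rect_map_tilt _ _ hg1
  have hlen2 : (((List.range (rows.headD []).length).foldl
      (fun g' c => setColG g' c (tiltLine (col g' c))) rows).map tiltLine).length
      = rows.length := by rw [List.length_map]; exact hlen1
  rw [b_fold_south_phase rows.length (rows.headD []).length (List.range (rows.headD []).length)
      _ (fun c hc => by simpa using hc) hg2 hlen2 hpos]
  obtain ⟨_, hg3, _, _, _⟩ := fold_setcol_inv (fun s => (tiltLine s.reverse).reverse)
    revtilt_length _ (rows.headD []).length hg2 (rows.headD []).length (le_refl _)
  exact List.map_congr_left (fun row hrow => bEastRow_take _ row (hg3 row hrow))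

-- ===== VERDICT (by name: the statement is the Claim_ definition above) =====
theorem full_cycle_tilt_spec : Claim_equal_full_cycle_tilt := by
  intro rows _ hpre
  obtain ⟨hne, hrect0⟩ := hpre
  unfold Spec_full_cycle_tilt
  rw [A_canon rows hne hrect0, B_canon rows hne hrect0]
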